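-- pv_equiv track=rewrite | github.com/Bo0od9/telegram_bot | vigenere_chipher.py | form_gamma_by_userkey
-- ===== SOURCE A (Python) =====
-- def get_dict():
--     '''
--     Создает словарь используемых символов.
--     :return: список используемых символов
--     '''
--     d = [' ', '.', ',', '?', '!', ':', ';']
--     i = 0
--     for i in range(48, 58):
--         d.append(chr(i))
--     for i in range(65, 91):
--         d.append(chr(i))
--     for i in range(97, 123):
--         d.append(chr(i))
--     return d
--
-- def char_to_index(word):
--     '''
--     Сопоставляет букву с ее номером в словаре используемых символов.
--     :param word: слово от пользователя
--     :return: список с номерами букв в словаре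
--     '''
--     list_code = []
--     d = get_dict()
--     for i in range(len(word)):
--         for j in range(len(d)):
--             if word[i] == d[j]:
--                 list_code.append(j)
--     return list_code
--
-- def form_gamma_by_userkey(text, key):  # формируем гамму на основе ключа
--     '''
--     Формирует гамму для наложения на открытый текст.
--     :param text: пользовательский текст
--     :param key: ключ от пользователя
--     :return: список символов гаммы
--     '''
--     key_code = char_to_index(key)
--     text_code = char_to_index(text)
--     gamma = key_code
--     iterr = 2
--     while len(gamma) < len(text_code):
--         gamma = gamma * iterr
--         iterr += 1
--     while len(gamma) > len(text_code):
--         gamma.pop()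
--     return gamma
-- ===== SOURCE B (Python) =====
-- _CHARS = ' .,?!:;0123456789ABCDEFGHIJKLMNOPQRSTUVWXYZabcdefghijklmnopqrstuvwxyz'
-- _IDX = {c: i for i, c in enumerate(_CHARS)}
--
--
-- def form_gamma_by_userkey(text, key):
--     key_code = [_IDX[c] for c in key if c in _IDX]
--     n = len([c for c in text if c in _IDX])
--     return [key_code[i % len(key_code)] for i in range(n)]
-- ===== Notes on version B (the rewrite author's own statement) =====
-- stated objective: faster
-- what changed: B replaces A's per-character 69-way linear scan by a precomputed char->index dict and replaces A's factorial list multiplication followed by one-at-a-time popping with direct modular indexing key_code[i % len(key_code)]; Pre_ excludes inputs whose key contains no alphabet character while the text does, on which A loops forever (gamma stays empty) and B raises ZeroDivisionError.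
import Mathlib
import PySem

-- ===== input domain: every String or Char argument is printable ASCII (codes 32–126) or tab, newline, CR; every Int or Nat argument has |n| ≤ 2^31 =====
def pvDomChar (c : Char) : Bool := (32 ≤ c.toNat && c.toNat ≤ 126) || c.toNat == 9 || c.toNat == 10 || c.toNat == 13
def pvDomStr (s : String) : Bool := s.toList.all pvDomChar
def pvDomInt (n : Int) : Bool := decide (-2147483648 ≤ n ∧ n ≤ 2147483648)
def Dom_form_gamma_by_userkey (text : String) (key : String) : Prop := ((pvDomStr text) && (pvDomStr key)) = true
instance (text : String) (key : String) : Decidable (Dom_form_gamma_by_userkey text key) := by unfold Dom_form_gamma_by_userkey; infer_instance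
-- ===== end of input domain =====

-- B replaces A's per-character linear scan of the 69-symbol alphabet by a precomputed char→index dict and
-- A's repeated list multiplication + popping by direct modular indexing (measurably faster in Python).

-- ===== PORT A =====
def pvGetDict : List Char :=
  let d : List Char := [' ', '.', ',', '?', '!', ':', ';']
  let d := (PySem.List.pyRange 48 58 1).foldl (fun d i => d ++ [Char.ofNat i.toNat]) d
  let d := (PySem.List.pyRange 65 91 1).foldl (fun d i => d ++ [Char.ofNat i.toNat]) d
  (PySem.List.pyRange 97 123 1).foldl (fun d i => d ++ [Char.ofNat i.toNat]) d

-- i, j come from range(len(word)) / range(len(d)), so the getD reads are exact for word[i] / d[j]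
def pvCharToIndex (word : String) : List Int :=
  let d := pvGetDict
  (List.range word.toList.length).foldl (fun acc i =>
    (List.range d.length).foldl (fun acc j =>
      if word.toList.getD i ' ' = d.getD j ' ' then acc ++ [(j : Int)] else acc) acc) []

-- the first while loop; gamma at least doubles per iteration when nonempty, so fuel = len(text_code)+1
-- always suffices; when gamma = [] and n > 0 the Python loops forever (such inputs are outside Pre_)
def pvGrow (fuel : Nat) (gamma : List Int) (iterr : Int) (n : Nat) : List Int :=
  match fuel with
  | 0 => gamma
  | fuel + 1 =>
    if gamma.length < n then pvGrow fuel (PySem.List.pyRepeat gamma iterr) (iterr + 1) n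
    else gamma

-- the second while loop: pop() the last element while the list is too long
def pvShrink (gamma : List Int) (n : Nat) : List Int :=
  if n < gamma.length then pvShrink gamma.dropLast n else gamma
termination_by gamma.length
decreasing_by simp [List.length_dropLast]; omega

def form_gamma_by_userkey (text : String) (key : String) : List Int :=
  let key_code := pvCharToIndex key
  let text_code := pvCharToIndex text
  pvShrink (pvGrow (text_code.length + 1) key_code 2 text_code.length) text_code.length

-- ===== PORT B =====
def pvAltChars : List Char :=
  " .,?!:;0123456789ABCDEFGHIJKLMNOPQRSTUVWXYZabcdefghijklmnopqrstuvwxyz".toList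

-- _IDX = {c: i for i, c in enumerate(_CHARS)}
def pvAltIdx : PySem.Dict Char Int :=
  (PySem.List.enumerate pvAltChars 0).foldl (fun d p => d.insert p.2 p.1) PySem.Dict.empty

def form_gamma_by_userkey_alt (text : String) (key : String) : List Int :=
  let key_code := key.toList.filterMap (fun c => pvAltIdx.get? c)
  let n := (text.toList.filter (fun c => pvAltIdx.contains c)).length
  -- i % len(key_code) is in range whenever key_code ≠ [], so getD is exact; range(n) is empty otherwise
  (List.range n).map (fun i => key_code.getD (i % key_code.length) 0)

-- ===== PRECONDITION & SPEC =====
-- the alphabet, repeated as a standalone literal so that Pre_ does not depend on either port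
def pvAlphabet : List Char :=
  " .,?!:;0123456789ABCDEFGHIJKLMNOPQRSTUVWXYZabcdefghijklmnopqrstuvwxyz".toList

-- Pre_ excludes exactly the inputs whose key contains no alphabet character while the text contains one:
-- there A's first while loop never terminates (gamma stays empty) and B raises ZeroDivisionError.
def Pre_form_gamma_by_userkey (text : String) (key : String) : Prop :=
  (key.toList.any (fun c => decide (c ∈ pvAlphabet))
    || text.toList.all (fun c => !(decide (c ∈ pvAlphabet)))) = true
instance (text : String) (key : String) : Decidable (Pre_form_gamma_by_userkey text key) := by
  unfold Pre_form_gamma_by_userkey; infer_instance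

def pvWitness_form_gamma_by_userkey : String × String := ("Hello, World!", "Key")

def Spec_form_gamma_by_userkey (text : String) (key : String) (out : List Int) : Prop := out = form_gamma_by_userkey_alt text key
instance (text : String) (key : String) (out : List Int) : Decidable (Spec_form_gamma_by_userkey text key out) := by unfold Spec_form_gamma_by_userkey; infer_instance

-- ===== CLAIM (what is proved, stated in full; the proofs are below) =====
def Claim_equal_form_gamma_by_userkey : Prop := ∀ (text : String) (key : String), Dom_form_gamma_by_userkey text key → Pre_form_gamma_by_userkey text key → Spec_form_gamma_by_userkey text key (form_gamma_by_userkey text key)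

-- ===== LEMMAS AND PROOFS =====

-- first index (from offset k) of c in d, as both programs compute it
def pvFind (d : List Char) (c : Char) (k : Int) : Option Int :=
  match d with
  | [] => none
  | x :: d => if x = c then some k else pvFind d c (k + 1)

theorem pvFind_shift (d : List Char) (c : Char) (k : Int) :
    pvFind d c k = (pvFind d c 0).map (· + k) := by
  induction d generalizing k with
  | nil => simp [pvFind]
  | cons x d ih =>
    simp only [pvFind]
    by_cases h : x = c
    · simp [h]
    · rw [if_neg h, if_neg h, ih (k + 1), ih (0 + 1), Option.map_map]
      congr 1; funext j; simp; ring

theorem pvFind_eq_none_of_not_mem (d : List Char) (c : Char) (k : Int) (h : c ∉ d) :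
    pvFind d c k = none := by
  induction d generalizing k with
  | nil => rfl
  | cons x d ih =>
    simp only [List.mem_cons, not_or] at h
    simp [pvFind, Ne.symm h.1, ih _ h.2]

theorem filter_range_eq_pvFind (d : List Char) (c : Char) (h : d.Nodup) :
    ((List.range d.length).filter (fun j => decide (c = d.getD j ' '))).map (fun (j : Nat) => (j : Int))
      = (pvFind d c 0).toList := by
  induction d with
  | nil => simp [pvFind]
  | cons x d ih =>
    have hnodup := (List.nodup_cons.mp h)
    rw [List.length_cons, List.range_succ_eq_map, List.filter_cons]
    by_cases hx : c = x
    · have hnm : c ∉ d := hx ▸ hnodup.1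
      have hrest : (List.map Nat.succ (List.range d.length)).filter
          (fun j => decide (c = (x :: d).getD j ' ')) = [] := by
        rw [List.filter_eq_nil_iff]
        intro a ha
        simp only [List.mem_map, List.mem_range] at ha
        obtain ⟨i, hi, rfl⟩ := ha
        simp only [List.getD_cons_succ, decide_eq_true_eq]
        intro hc
        exact hnm (hc ▸ (List.getD_eq_getElem d ' ' hi ▸ List.getElem_mem hi))
      rw [hrest]
      simp only [List.getD_cons_zero, hx, decide_true, if_pos]
      simp [pvFind, hx.symm]
    · simp only [List.getD_cons_zero, show decide (c = x) = false by simpa using hx,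
        Bool.false_eq_true, if_false]
      rw [List.filter_map]
      have hcond : ((fun j => decide (c = (x :: d).getD j ' ')) ∘ Nat.succ)
          = fun j => decide (c = d.getD j ' ') := by
        funext j; simp [Function.comp]
      rw [hcond, List.map_map]
      have h1 : ((fun (j : Nat) => (j : Int)) ∘ Nat.succ) = (fun (j : Nat) => ((j : Int) + 1)) := by
        funext j; simp [Function.comp]
      rw [h1, show (fun (j : Nat) => ((j : Int) + 1)) = ((fun (z : Int) => z + 1) ∘ (fun (j : Nat) => (j : Int))) from rfl,
        ← List.map_map, ih hnodup.2]
      rw [show pvFind (x :: d) c 0 = pvFind d c (0 + 1) by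
          simp only [pvFind]; rw [if_neg (fun hh => hx (Eq.symm hh))]]
      rw [pvFind_shift d c (0 + 1)]
      cases pvFind d c 0 <;> simp

theorem pvDict_eq : pvGetDict = pvAltChars := by decide

theorem pvAltChars_nodup : pvAltChars.Nodup := by decide

theorem pvAlphabet_eq : pvAlphabet = pvAltChars := by decide

theorem pvFind_isSome_of_mem (d : List Char) (c : Char) (k : Int) (h : c ∈ d) :
    (pvFind d c k).isSome := by
  induction d generalizing k with
  | nil => simp at h
  | cons x d ih =>
    by_cases hx : x = c
    · simp [pvFind, hx]
    · simp only [List.mem_cons] at h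
      rcases h with h | h
      · exact absurd h.symm hx
      · simpa [pvFind, hx] using ih _ h

theorem flatMap_getD_eq (l : List Char) (g : Char → List Int) :
    (List.range l.length).flatMap (fun i => g (l.getD i ' ')) = l.flatMap g := by
  induction l with
  | nil => rfl
  | cons x t ih =>
    rw [List.length_cons, List.range_succ_eq_map, List.flatMap_cons, List.flatMap_map,
      List.flatMap_cons]
    simp only [List.getD_cons_zero, List.getD_cons_succ]
    rw [ih]

theorem flatMap_toList_eq_filterMap (l : List Char) (f : Char → Option Int) :
    l.flatMap (fun c => (f c).toList) = l.filterMap f := by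
  induction l with
  | nil => rfl
  | cons x t ih =>
    rw [List.flatMap_cons, List.filterMap_cons, ih]
    cases f x <;> simp

theorem pvCharToIndex_eq (w : String) :
    pvCharToIndex w = w.toList.filterMap (fun c => pvFind pvAltChars c 0) := by
  unfold pvCharToIndex
  simp only [pvDict_eq]
  have inner : ∀ (acc : List Int) (c : Char),
      (List.range pvAltChars.length).foldl (fun acc j =>
        if c = pvAltChars.getD j ' ' then acc ++ [(j : Int)] else acc) acc
      = acc ++ (pvFind pvAltChars c 0).toList := by
    intro acc c
    rw [PySem.List.foldl_append_ite (p := fun j => c = pvAltChars.getD j ' ')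
      (f := fun (j : Nat) => (j : Int))]
    rw [filter_range_eq_pvFind _ _ pvAltChars_nodup]
  have houter := PySem.List.foldl_congr_mem (List.range w.toList.length)
    (fun (acc : List Int) (i : Nat) => (List.range pvAltChars.length).foldl (fun acc j =>
        if w.toList.getD i ' ' = pvAltChars.getD j ' ' then acc ++ [(j : Int)] else acc) acc)
    (fun (acc : List Int) (i : Nat) =>
      acc ++ (pvFind pvAltChars (w.toList.getD i ' ') 0).toList)
    [] (fun acc i _ => inner acc _)
  rw [houter, PySem.List.foldl_append_eq_flatMap, List.nil_append]
  rw [flatMap_getD_eq w.toList (fun c => (pvFind pvAltChars c 0).toList),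
    flatMap_toList_eq_filterMap]

theorem get?_foldl_enum (l : List Char) (k : Int) (d : PySem.Dict Char Int) (c : Char)
    (hn : l.Nodup) (hf : ∀ x ∈ l, d.contains x = false) :
    ((PySem.List.enumerate l k).foldl (fun d p => d.insert p.2 p.1) d).get? c
      = if c ∈ l then pvFind l c k else d.get? c := by
  induction l generalizing k d with
  | nil => simp [PySem.List.enumerate_nil]
  | cons x l ih =>
    rw [PySem.List.enumerate_cons, List.foldl_cons]
    have hnodup := List.nodup_cons.mp hn
    have hf' : ∀ y ∈ l, (d.insert x k).contains y = false := by
      intro y hy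
      rw [PySem.Dict.contains_insert]
      have : (y == x) = false := by
        simp only [beq_eq_false_iff_ne, ne_eq]
        exact fun h => hnodup.1 (h ▸ hy)
      rw [this, hf y (List.mem_cons_of_mem _ hy)]; rfl
    rw [ih (k + 1) (d.insert x k) hnodup.2 hf']
    by_cases hm : c ∈ l
    · have hcx : ¬ (x = c) := fun h => hnodup.1 (h ▸ hm)
      simp [hm, pvFind, hcx]
    · rw [if_neg hm, PySem.Dict.get?_insert]
      by_cases hcx : c = x
      · simp [hcx, pvFind]
      · have : ¬ (x = c) := fun h => hcx h.symm
        simp [hcx, hm]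

theorem pvAltIdx_get? (c : Char) : pvAltIdx.get? c = pvFind pvAltChars c 0 := by
  unfold pvAltIdx
  rw [get?_foldl_enum pvAltChars 0 PySem.Dict.empty c pvAltChars_nodup
    (by intro x _; exact PySem.Dict.contains_empty x)]
  by_cases h : c ∈ pvAltChars
  · simp [h]
  · simp [h, PySem.Dict.get?_empty, pvFind_eq_none_of_not_mem _ _ _ h]

theorem pvAltIdx_contains (c : Char) : pvAltIdx.contains c = (pvFind pvAltChars c 0).isSome := by
  rw [PySem.Dict.contains_eq_isSome_get?, pvAltIdx_get?]

-- B's result in canonical form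
theorem alt_canonical (text key : String) :
    form_gamma_by_userkey_alt text key
      = (List.range (text.toList.filterMap (fun c => pvFind pvAltChars c 0)).length).map
          (fun i => (key.toList.filterMap (fun c => pvFind pvAltChars c 0)).getD
            (i % (key.toList.filterMap (fun c => pvFind pvAltChars c 0)).length) 0) := by
  unfold form_gamma_by_userkey_alt
  have hk : key.toList.filterMap (fun c => pvAltIdx.get? c)
      = key.toList.filterMap (fun c => pvFind pvAltChars c 0) := by
    apply List.filterMap_congr; intro c _; exact pvAltIdx_get? c
  have hn : (text.toList.filter (fun c => pvAltIdx.contains c)).length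
      = (text.toList.filterMap (fun c => pvFind pvAltChars c 0)).length := by
    rw [List.length_filterMap_eq_countP, ← List.countP_eq_length_filter]
    apply List.countP_congr
    intro c _; rw [pvAltIdx_contains]
  rw [hk, hn]

theorem length_flatten_replicate (m : Nat) (kc : List Int) :
    ((List.replicate m kc).flatten).length = m * kc.length := by
  induction m with
  | zero => simp
  | succ m ih => rw [List.replicate_succ, List.flatten_cons, List.length_append, ih]; ring

theorem flatten_replicate_flatten (a m : Nat) (kc : List Int) :
    (List.replicate a ((List.replicate m kc).flatten)).flatten
      = (List.replicate (a * m) kc).flatten := by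
  induction a with
  | zero => simp
  | succ a ih =>
    rw [List.replicate_succ, List.flatten_cons, ih, Nat.succ_mul, Nat.add_comm,
      List.replicate_add, List.flatten_append]

theorem pvGrow_spec (fuel : Nat) : ∀ (m : Nat) (it : Int) (n : Nat) (kc : List Int),
    1 ≤ m → 2 ≤ it → 1 ≤ kc.length → n ≤ fuel + m * kc.length →
    ∃ m', 1 ≤ m' ∧ n ≤ m' * kc.length ∧
      pvGrow fuel ((List.replicate m kc).flatten) it n = (List.replicate m' kc).flatten := by
  induction fuel with
  | zero =>
    intro m it n kc hm _ _ hle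
    exact ⟨m, hm, by simpa using hle, rfl⟩
  | succ fuel ih =>
    intro m it n kc hm hit hkc hle
    by_cases h : ((List.replicate m kc).flatten).length < n
    · rw [show pvGrow (fuel + 1) ((List.replicate m kc).flatten) it n
          = pvGrow fuel (PySem.List.pyRepeat ((List.replicate m kc).flatten) it) (it + 1) n by
        simp only [pvGrow]; rw [if_pos h]]
      have hrep : PySem.List.pyRepeat ((List.replicate m kc).flatten) it
          = (List.replicate (it.toNat * m) kc).flatten := by
        show (List.replicate it.toNat ((List.replicate m kc).flatten)).flatten = _
        exact flatten_replicate_flatten it.toNat m kc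
      rw [hrep]
      have h2 : 2 ≤ it.toNat := by omega
      have hmul : 2 * m ≤ it.toNat * m := Nat.mul_le_mul_right m h2
      rw [length_flatten_replicate] at h
      refine ih (it.toNat * m) (it + 1) n kc (by nlinarith) (by omega) hkc ?_
      have : m * kc.length + kc.length ≤ it.toNat * m * kc.length := by nlinarith
      omega
    · refine ⟨m, hm, ?_, by simp only [pvGrow]; rw [if_neg h]⟩
      rw [length_flatten_replicate] at h
      omega

theorem pvShrink_take (g : List Int) (n : Nat) (h : n ≤ g.length) :
    pvShrink g n = g.take n := by
  by_cases hlt : n < g.length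
  · rw [pvShrink, if_pos hlt,
      pvShrink_take g.dropLast n (by simp only [List.length_dropLast]; omega)]
    rw [List.dropLast_eq_take, List.take_take]
    congr 1; omega
  · rw [pvShrink, if_neg hlt]
    have hn : n = g.length := by omega
    rw [hn, List.take_length]
termination_by g.length
decreasing_by simp only [List.length_dropLast]; omega

theorem flatten_replicate_cyclic (m : Nat) (kc : List Int) (hkc : kc ≠ []) :
    (List.replicate m kc).flatten
      = (List.range (m * kc.length)).map (fun i => kc.getD (i % kc.length) 0) := by
  have hL : 0 < kc.length := List.length_pos_iff.mpr hkc
  induction m with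
  | zero => simp
  | succ m ih =>
    rw [List.replicate_succ, List.flatten_cons, ih]
    rw [show (m + 1) * kc.length = kc.length + m * kc.length by ring, List.range_add,
      List.map_append, List.map_map]
    congr 1
    · apply List.ext_getElem (by simp)
      intro i hi _
      simp only [List.getElem_map, List.getElem_range]
      rw [Nat.mod_eq_of_lt (by simpa using hi), List.getD_eq_getElem kc 0 (by simpa using hi)]
    · apply List.map_congr_left
      intro i _
      simp only [Function.comp]
      rw [Nat.add_mod_left]

theorem key_code_ne_nil (key : String) (c : Char) (hc : c ∈ key.toList) (hm : c ∈ pvAlphabet) :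
    key.toList.filterMap (fun c => pvFind pvAltChars c 0) ≠ [] := by
  intro hnil
  rw [List.filterMap_eq_nil_iff] at hnil
  have := hnil c hc
  have hs := pvFind_isSome_of_mem pvAltChars c 0 (pvAlphabet_eq ▸ hm)
  rw [this] at hs
  simp at hs

theorem pre_iff (text key : String) : Pre_form_gamma_by_userkey text key ↔
    ((∃ c ∈ key.toList, c ∈ pvAlphabet) ∨ (∀ c ∈ text.toList, c ∉ pvAlphabet)) := by
  unfold Pre_form_gamma_by_userkey
  simp

theorem text_code_nil (text : String) (h : ∀ c ∈ text.toList, c ∉ pvAlphabet) :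
    text.toList.filterMap (fun c => pvFind pvAltChars c 0) = [] := by
  rw [List.filterMap_eq_nil_iff]
  intro c hc
  exact pvFind_eq_none_of_not_mem _ _ _ (fun hm => h c hc (pvAlphabet_eq ▸ hm))

theorem a_canonical (text key : String) :
    form_gamma_by_userkey text key
      = pvShrink (pvGrow ((pvCharToIndex text).length + 1) (pvCharToIndex key) 2
          (pvCharToIndex text).length) (pvCharToIndex text).length := rfl

-- ===== VERDICT (by name: the statement is the Claim_ definition above) =====
theorem form_gamma_by_userkey_spec : Claim_equal_form_gamma_by_userkey := by
  intro text key _ hpre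
  unfold Spec_form_gamma_by_userkey
  rw [alt_canonical, a_canonical, pvCharToIndex_eq, pvCharToIndex_eq]
  by_cases hnil : key.toList.filterMap (fun c => pvFind pvAltChars c 0) = []
  · have hz : text.toList.filterMap (fun c => pvFind pvAltChars c 0) = [] := by
      rcases (pre_iff text key).mp hpre with ⟨c, hc, hm⟩ | hall
      · exact absurd hnil (key_code_ne_nil key c hc hm)
      · exact text_code_nil text hall
    rw [hnil, hz]
    simp only [List.length_nil]
    rw [show pvGrow (0 + 1) ([] : List Int) 2 0 = [] from rfl,
      pvShrink_take [] 0 (by simp)]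
    simp
  · have hL : 1 ≤ (key.toList.filterMap (fun c => pvFind pvAltChars c 0)).length :=
      List.length_pos_iff.mpr hnil
    obtain ⟨m', hm', hnle, hgrow⟩ :=
      pvGrow_spec ((text.toList.filterMap (fun c => pvFind pvAltChars c 0)).length + 1) 1 2
        (text.toList.filterMap (fun c => pvFind pvAltChars c 0)).length
        (key.toList.filterMap (fun c => pvFind pvAltChars c 0)) le_rfl (by norm_num) hL (by omega)
    rw [show (List.replicate 1 (key.toList.filterMap (fun c => pvFind pvAltChars c 0))).flatten
        = key.toList.filterMap (fun c => pvFind pvAltChars c 0) by simp] at hgrow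
    rw [hgrow, pvShrink_take _ _ (by rw [length_flatten_replicate]; exact hnle)]
    rw [flatten_replicate_cyclic m' _ hnil, ← List.map_take, List.take_range,
      Nat.min_eq_left hnle]
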